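-- pv_equiv track=rewrite | github.com/IchBinJade/advent-of-code-python | 2023/day08.py | do_sync_traversal
-- ===== SOURCE A (Python) =====
-- from itertools import cycle
--
-- def do_sync_traversal(instruction, graph, start_nodes_list):
--     """
--     Part 2: Traverse multiple start nodes simultaneously. ALL nodes
--     have to end up as nodes ending with "Z".
--
--     Args:
--         instruction (str): A string of "L" and "R" characters representing the directions to follow.
--         graph (dict): A dictionary where keys are node names, and values are tuples representing
--                       the left and right child nodes.
--         start_nodes (list): A list of nodes to start the traversal from, each node being a string.
--
--     Returns:
--         steps_list (list[int]): List of number of moves taken while traversing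
--     """
--     steps_list = []
--
--     # Track the current positions of all nodes
--     node_buffer = start_nodes_list[:]
--
--     for move_idx, left_or_right in enumerate(cycle(instruction)):
--         next_moves = []
--         for node in node_buffer:
--             left, right = graph[node]
--             # Follow the instruction
--             if left_or_right == "L":
--                 next_moves.append(left)
--             else:
--                 next_moves.append(right)
--
--         node_buffer = next_moves
--
--         # If all nodes have reached Z, record their steps
--         for node in node_buffer:
--             if node.endswith("Z"):
--                 steps_list.append(move_idx + 1)
--
--         # Stop if all nodes have reached Z
--         if len(steps_list) == len(start_nodes_list):
--             break
--
--     return steps_list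
-- ===== SOURCE B (Python) =====
-- def do_sync_traversal(instruction, graph, start_nodes_list):
--     """Pass-block re-implementation: walk each node independently through one
--     full instruction pass, merge the pass's Z-hit steps in sorted order, and
--     return the first len(start_nodes_list) hit steps."""
--     k = len(start_nodes_list)
--     if k == 0 or not instruction:
--         return []
--
--     def pass_effect(node):
--         # Walk one full instruction pass from `node`; return the node reached
--         # and the 1-based offsets (within the pass) at which we sit on a *Z node.
--         hits = []
--         cur = node
--         for j, d in enumerate(instruction):
--             left, right = graph[cur]
--             cur = left if d == "L" else right
--             if cur.endswith("Z"):
--                 hits.append(j + 1)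
--         return cur, hits
--
--     out = []
--     cur_nodes = start_nodes_list
--     base = 0
--     while len(out) < k:
--         next_nodes = []
--         events = []
--         for node in cur_nodes:
--             end, hits = pass_effect(node)
--             next_nodes.append(end)
--             events.extend(base + h for h in hits)
--         events.sort()
--         out.extend(events)
--         cur_nodes = next_nodes
--         base += len(instruction)
--     return out[:k]
-- ===== Notes on version B (the rewrite author's own statement) =====
-- stated objective: alternative
-- what changed: A walks all nodes in lockstep one instruction character at a time, appending per-step Z-hits and breaking on an exact count; B walks each node independently through whole instruction passes, merges each pass's Z-hit steps with a sort, and truncates the event stream to the first len(start_nodes_list) hits.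
-- outside the precondition, e.g. on do_sync_traversal('LL', {'AA': ('AZ', 'AA')}, ['AA']): A returns [1], B raises KeyError
import Mathlib
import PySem

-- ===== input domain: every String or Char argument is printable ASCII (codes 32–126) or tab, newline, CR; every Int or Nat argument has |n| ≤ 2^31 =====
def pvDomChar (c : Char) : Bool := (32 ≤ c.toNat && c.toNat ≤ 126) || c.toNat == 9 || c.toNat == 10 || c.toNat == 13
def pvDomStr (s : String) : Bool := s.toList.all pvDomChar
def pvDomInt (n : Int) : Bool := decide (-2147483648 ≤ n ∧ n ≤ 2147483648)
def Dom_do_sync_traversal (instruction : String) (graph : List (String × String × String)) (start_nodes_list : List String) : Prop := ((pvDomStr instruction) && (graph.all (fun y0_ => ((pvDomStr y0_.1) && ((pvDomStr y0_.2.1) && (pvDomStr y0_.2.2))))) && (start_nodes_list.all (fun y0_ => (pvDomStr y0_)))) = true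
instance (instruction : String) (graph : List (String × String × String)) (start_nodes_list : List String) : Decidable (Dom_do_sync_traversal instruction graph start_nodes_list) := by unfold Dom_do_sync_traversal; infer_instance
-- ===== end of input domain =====

-- B replaces A's lockstep per-step scan with independent per-node full-pass walks whose
-- Z-hit steps are merged in sorted order and truncated to the first k (objective: alternative).
-- A's Python loop can run forever; both ports therefore carry a fuel argument that (provably,
-- theorem pvTermBound below) covers every terminating run admitted by Pre_.

-- fuel for the ports: whenever Python A terminates on a closed graph it does so within
-- |instruction|*|graph|*(k+1) steps (theorem pvTermBound); pvFuel adds one slack pass.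
def pvFuel (chars : List Char) (graph : List (String × String × String)) (starts : List String) : Nat :=
  chars.length * graph.length * (starts.length + 1) + chars.length

-- ===== PORT A =====
-- inner `for node in node_buffer` building next_moves (KeyError = none)
def pvANext (graph : List (String × String × String)) (c : Char) : List String → Option (List String)
  | [] => some []
  | n :: rest =>
    match List.lookup n graph with
    | none => none
    | some lr => (pvANext graph c rest).map (fun tl => (if c == 'L' then lr.1 else lr.2) :: tl)

-- `for move_idx, left_or_right in enumerate(cycle(instruction))` with the break
def pvALoop (graph : List (String × String × String)) (chars : List Char) (k : Nat) :
    Nat → Nat → List String → List Int → List Int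
  | 0, _, _, steps => steps
  | f+1, i, buf, steps =>
    match pvANext graph (chars.getD (i % chars.length) ' ') buf with
    | none => steps   -- KeyError (outside Pre_)
    | some nb =>
      let steps' := nb.foldl (fun acc n => if PySem.Str.endswith n "Z" then acc ++ [((i : Int) + 1)] else acc) steps
      if steps'.length = k then steps' else pvALoop graph chars k f (i+1) nb steps'

def do_sync_traversal (instruction : String) (graph : List (String × String × String)) (start_nodes_list : List String) : List Int :=
  let chars := instruction.toList
  if chars.isEmpty then [] else
    pvALoop graph chars start_nodes_list.length (pvFuel chars graph start_nodes_list) 0 start_nodes_list []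

-- ===== PORT B =====
-- `pass_effect`: one full instruction pass from `node`, returning the node reached and the 1-based hit offsets
def pvBWalk (graph : List (String × String × String)) : List Char → Nat → String → Option (String × List Int)
  | [], _, cur => some (cur, [])
  | c :: cs, j, cur =>
    match List.lookup cur graph with
    | none => none
    | some lr =>
      let nxt := if c == 'L' then lr.1 else lr.2
      match pvBWalk graph cs (j+1) nxt with
      | none => none
      | some et => some (et.1, (if PySem.Str.endswith nxt "Z" then [((j : Int) + 1)] else []) ++ et.2)

-- `for node in cur_nodes` of one pass: next_nodes and the pass's events (node-major)
def pvBPass (graph : List (String × String × String)) (chars : List Char) (base : Int) : List String → Option (List String × List Int)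
  | [] => some ([], [])
  | n :: rest =>
    match pvBWalk graph chars 0 n with
    | none => none
    | some et =>
      match pvBPass graph chars base rest with
      | none => none
      | some ne => some (et.1 :: ne.1, et.2.map (fun h => base + h) ++ ne.2)

-- `while len(out) < k` over passes
def pvBLoop (graph : List (String × String × String)) (chars : List Char) (k : Nat) :
    Nat → List String → Int → List Int → List Int
  | 0, _, _, out => out.take k    -- fuel exhausted: Python B diverges here (outside Pre_)
  | f+1, cur, base, out =>
    if out.length < k then
      match pvBPass graph chars base cur with
      | none => out.take k   -- KeyError (outside Pre_)
      | some ne =>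
        pvBLoop graph chars k f ne.1 (base + (chars.length : Int)) (out ++ PySem.List.sorted ne.2 (fun x => x) false)
    else out.take k

def do_sync_traversal_alt (instruction : String) (graph : List (String × String × String)) (start_nodes_list : List String) : List Int :=
  let k := start_nodes_list.length
  let chars := instruction.toList
  if k == 0 || chars.isEmpty then [] else
    pvBLoop graph chars k (pvFuel chars graph start_nodes_list) start_nodes_list 0 []

-- ===== SPEC-LEVEL TRACE (used by Pre_; a mathematical description of the synchronized walk,
-- not either port's recursion: buffer after n steps, Z-hit events of step n, events of the first n steps) =====
def pvKeyOk (graph : List (String × String × String)) (n : String) : Bool := (List.lookup n graph).isSome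

def pvClosed (graph : List (String × String × String)) (starts : List String) : Bool :=
  starts.all (pvKeyOk graph) && graph.all (fun e => pvKeyOk graph e.2.1 && pvKeyOk graph e.2.2)

def pvStep (graph : List (String × String × String)) (c : Char) (n : String) : String :=
  match List.lookup n graph with
  | some lr => if c == 'L' then lr.1 else lr.2
  | none => n

def pvCountZ (ns : List String) : Nat := (ns.filter (fun n => PySem.Str.endswith n "Z")).length

def pvBuf (graph : List (String × String × String)) (chars : List Char) (starts : List String) : Nat → List String
  | 0 => starts
  | n+1 => (pvBuf graph chars starts n).map (pvStep graph (chars.getD (n % chars.length) ' '))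

def pvSeg (graph : List (String × String × String)) (chars : List Char) (starts : List String) (n : Nat) : List Int :=
  List.replicate (pvCountZ (pvBuf graph chars starts (n+1))) ((n : Int) + 1)

def pvE (graph : List (String × String × String)) (chars : List Char) (starts : List String) (n : Nat) : List Int :=
  (List.range n).flatMap (pvSeg graph chars starts)

-- ===== TERMINATION BOUND (needed by Pre_'s Decidable instance, hence above it):
-- on a closed graph, if the cumulative Z-hit count ever equals k = |starts| it does so
-- within (k+1)·|graph|·|instruction| steps — each node's (position, phase) state lives in a
-- space of ≤ |graph|·|instruction| states, so hits recur with period ≤ that bound. =====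

def pvBound (graph : List (String × String × String)) (chars : List Char) (starts : List String) : Nat :=
  (starts.length + 1) * (graph.length * chars.length)

-- single-node trajectory and its Z-hits
def pvPos (graph : List (String × String × String)) (chars : List Char) (n : String) : Nat → String
  | 0 => n
  | t+1 => pvStep graph (chars.getD (t % chars.length) ' ') (pvPos graph chars n t)

def pvHit (graph : List (String × String × String)) (chars : List Char) (n : String) (t : Nat) : Bool :=
  PySem.Str.endswith (pvPos graph chars n (t+1)) "Z"

theorem pvBuf_eq_map_pos (graph : List (String × String × String)) (chars : List Char) (starts : List String) (t : Nat) :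
    pvBuf graph chars starts t = starts.map (fun n => pvPos graph chars n t) := by
  induction t with
  | zero => simp [pvBuf, pvPos]
  | succ t ih => simp [pvBuf, ih, pvPos, List.map_map]

theorem pvE_succ (graph : List (String × String × String)) (chars : List Char) (starts : List String) (n : Nat) :
    pvE graph chars starts (n+1) = pvE graph chars starts n ++ pvSeg graph chars starts n := by
  simp [pvE, List.range_succ]

theorem pvE_len_succ (graph : List (String × String × String)) (chars : List Char) (starts : List String) (n : Nat) :
    (pvE graph chars starts (n+1)).length
      = (pvE graph chars starts n).length + pvCountZ (pvBuf graph chars starts (n+1)) := by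
  rw [pvE_succ]; simp [pvSeg]

theorem pvE_len_mono (graph : List (String × String × String)) (chars : List Char) (starts : List String)
    {a b : Nat} (h : a ≤ b) : (pvE graph chars starts a).length ≤ (pvE graph chars starts b).length := by
  induction b with
  | zero => simpa using (Nat.le_zero.mp h) ▸ le_refl _
  | succ b ih =>
    rcases Nat.lt_or_ge a (b+1) with h' | h'
    · have := ih (Nat.lt_succ_iff.mp h')
      rw [pvE_succ]; simpa using Nat.le_trans this (by simp)
    · have : a = b + 1 := Nat.le_antisymm h h'
      simp [this]

theorem pvLookup_mem (g : List (String × String × String)) (n : String) (lr : String × String)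
    (h : List.lookup n g = some lr) : (n, lr) ∈ g := by
  induction g with
  | nil => simp [List.lookup] at h
  | cons e t ih =>
    rw [List.lookup_cons] at h
    split at h
    · next he =>
      cases h
      obtain ⟨a, bc⟩ := e
      have hna : n = a := by simpa using he
      simp [hna]
    · right; exact ih h

theorem pvKeyOk_step (graph : List (String × String × String)) (starts : List String)
    (hcl : pvClosed graph starts = true) (c : Char) (n : String) (hn : pvKeyOk graph n = true) :
    pvKeyOk graph (pvStep graph c n) = true := by
  cases hl : List.lookup n graph with
  | none => simpa [pvStep, hl] using hn
  | some lr =>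
    have hm := pvLookup_mem graph n lr hl
    simp only [pvClosed, Bool.and_eq_true, List.all_eq_true] at hcl
    have h2 := hcl.2 _ hm
    simp only [pvStep, hl]
    split
    · exact h2.1
    · exact h2.2

theorem pvPos_keyOk (graph : List (String × String × String)) (chars : List Char) (starts : List String)
    (hcl : pvClosed graph starts = true) (n0 : String) (hmem : n0 ∈ starts) (t : Nat) :
    pvKeyOk graph (pvPos graph chars n0 t) = true := by
  induction t with
  | zero =>
    simp only [pvClosed, Bool.and_eq_true, List.all_eq_true] at hcl
    exact hcl.1 n0 hmem
  | succ t ih => exact pvKeyOk_step graph starts hcl _ _ ih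

theorem pvKeyOk_mem_fst (graph : List (String × String × String)) (n : String)
    (h : pvKeyOk graph n = true) : n ∈ graph.map Prod.fst := by
  rcases Option.isSome_iff_exists.mp h with ⟨lr, hl⟩
  exact List.mem_map.mpr ⟨(n, lr), pvLookup_mem graph n lr hl, rfl⟩

-- the per-node state: (position, phase in the instruction)
def pvSt (graph : List (String × String × String)) (chars : List Char) (n0 : String) (t : Nat) : String × Nat :=
  (pvPos graph chars n0 t, t % chars.length)

theorem pvSt_step (graph : List (String × String × String)) (chars : List Char) (n0 : String) (t : Nat) :
    pvSt graph chars n0 (t+1)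
      = (pvStep graph (chars.getD ((pvSt graph chars n0 t).2) ' ') (pvSt graph chars n0 t).1,
         ((pvSt graph chars n0 t).2 + 1) % chars.length) := by
  unfold pvSt
  refine Prod.ext rfl ?_
  simp [Nat.add_mod]

theorem pvSt_shift (graph : List (String × String × String)) (chars : List Char) (n0 : String)
    {a b : Nat} (hab : pvSt graph chars n0 a = pvSt graph chars n0 b) (d : Nat) :
    pvSt graph chars n0 (a + d) = pvSt graph chars n0 (b + d) := by
  induction d with
  | zero => simpa using hab
  | succ d ih => rw [← Nat.add_assoc, ← Nat.add_assoc, pvSt_step, pvSt_step, ih]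

theorem pvPos_period (graph : List (String × String × String)) (chars : List Char) (n0 : String)
    {a b : Nat} (hab : pvSt graph chars n0 a = pvSt graph chars n0 b) (hlt : a ≤ b) (t : Nat) (ht : a ≤ t) :
    pvPos graph chars n0 (t + (b - a)) = pvPos graph chars n0 t := by
  obtain ⟨d, rfl⟩ : ∃ d, t = a + d := ⟨t - a, by omega⟩
  have h1 := pvSt_shift graph chars n0 hab d
  have h2 : a + d + (b - a) = b + d := by omega
  rw [h2]
  exact (congrArg Prod.fst h1).symm

theorem pvHit_period (graph : List (String × String × String)) (chars : List Char) (n0 : String)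
    {a b : Nat} (hab : pvSt graph chars n0 a = pvSt graph chars n0 b) (hlt : a ≤ b) (t : Nat) (ht : a ≤ t) :
    pvHit graph chars n0 (t + (b - a)) = pvHit graph chars n0 t := by
  unfold pvHit
  have : t + (b - a) + 1 = (t + 1) + (b - a) := by omega
  rw [this, pvPos_period graph chars n0 hab hlt (t+1) (by omega)]

-- pigeonhole: two equal states within the first |graph|*|instruction|+1 steps
theorem pvExists_rep (graph : List (String × String × String)) (chars : List Char) (starts : List String)
    (hcl : pvClosed graph starts = true) (n0 : String) (hmem : n0 ∈ starts) (hch : chars ≠ []) :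
    ∃ a b, a < b ∧ b ≤ graph.length * chars.length ∧ pvSt graph chars n0 a = pvSt graph chars n0 b := by
  have hL : 0 < chars.length := List.length_pos_iff.mpr hch
  have hmaps : ∀ t ∈ Finset.range (graph.length * chars.length + 1),
      pvSt graph chars n0 t ∈ ((graph.map Prod.fst).toFinset ×ˢ Finset.range chars.length) := by
    intro t _
    refine Finset.mem_product.mpr ⟨?_, ?_⟩
    · exact List.mem_toFinset.mpr (pvKeyOk_mem_fst graph _ (pvPos_keyOk graph chars starts hcl n0 hmem t))
    · exact Finset.mem_range.mpr (Nat.mod_lt _ hL)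
  have hcard : ((graph.map Prod.fst).toFinset ×ˢ Finset.range chars.length).card
      < (Finset.range (graph.length * chars.length + 1)).card := by
    rw [Finset.card_product, Finset.card_range, Finset.card_range]
    have h1 : (graph.map Prod.fst).toFinset.card ≤ graph.length := by
      calc (graph.map Prod.fst).toFinset.card ≤ (graph.map Prod.fst).length := List.toFinset_card_le _
        _ = graph.length := List.length_map _
    calc (graph.map Prod.fst).toFinset.card * chars.length
        ≤ graph.length * chars.length := Nat.mul_le_mul_right _ h1
      _ < graph.length * chars.length + 1 := Nat.lt_succ_self _
  obtain ⟨x, hx, y, hy, hxy, hst⟩ :=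
    Finset.exists_ne_map_eq_of_card_lt_of_maps_to hcard hmaps
  rcases Nat.lt_or_ge x y with h | h
  · exact ⟨x, y, h, by simpa using Nat.lt_succ_iff.mp (Finset.mem_range.mp hy), hst⟩
  · have h' : y < x := by omega
    exact ⟨y, x, h', by simpa using Nat.lt_succ_iff.mp (Finset.mem_range.mp hx), hst.symm⟩

-- pull a hit at time t ≥ a back into the window [a, a+q)
theorem pvHit_descend (graph : List (String × String × String)) (chars : List Char) (n0 : String)
    {a b : Nat} (hab : pvSt graph chars n0 a = pvSt graph chars n0 b) (hlt : a < b) :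
    ∀ t, a ≤ t → pvHit graph chars n0 t = true →
      ∃ t1, a ≤ t1 ∧ t1 < a + (b - a) ∧ pvHit graph chars n0 t1 = true := by
  intro t
  induction t using Nat.strong_induction_on with
  | _ t ih =>
    intro ha hh
    by_cases hsmall : t < a + (b - a)
    · exact ⟨t, ha, hsmall, hh⟩
    · have hq : 0 < b - a := by omega
      have ht' : a ≤ t - (b - a) := by omega
      have heq : t - (b - a) + (b - a) = t := by omega
      have hh' : pvHit graph chars n0 (t - (b - a)) = true := by
        rw [← pvHit_period graph chars n0 hab (Nat.le_of_lt hlt) _ ht', heq]; exact hh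
      exact ih (t - (b - a)) (by omega) ht' hh'

theorem pvHit_forward (graph : List (String × String × String)) (chars : List Char) (n0 : String)
    {a b : Nat} (hab : pvSt graph chars n0 a = pvSt graph chars n0 b) (hlt : a ≤ b)
    (t1 : Nat) (ht1 : a ≤ t1) (hh : pvHit graph chars n0 t1 = true) (j : Nat) :
    pvHit graph chars n0 (t1 + j * (b - a)) = true := by
  induction j with
  | zero => simpa using hh
  | succ j ih =>
    have : t1 + (j + 1) * (b - a) = (t1 + j * (b - a)) + (b - a) := by ring
    rw [this, pvHit_period graph chars n0 hab hlt _ (by omega)]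
    exact ih

-- counting: j+1 hits among the first t1 + j*q + 1 steps
theorem pvCount_hits (p : Nat → Bool) (t1 q : Nat) (hq : 0 < q)
    (hall : ∀ j, p (t1 + j * q) = true) (j : Nat) :
    j + 1 ≤ (List.range (t1 + j * q + 1)).countP p := by
  induction j with
  | zero =>
    have h1 : 0 < (List.range (t1 + 1)).countP p :=
      List.countP_pos_iff.mpr ⟨t1, by simp, by simpa using hall 0⟩
    simpa using h1
  | succ j ih =>
    have hsplit : t1 + (j + 1) * q + 1 = (t1 + j * q + 1) + q := by ring
    rw [hsplit, List.range_add, List.countP_append]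
    have hmem : (t1 + j * q + 1) + (q - 1) ∈ (List.range q).map (fun x => t1 + j * q + 1 + x) :=
      List.mem_map.mpr ⟨q - 1, by simp [List.mem_range]; omega, rfl⟩
    have hval : (t1 + j * q + 1) + (q - 1) = t1 + (j + 1) * q := by
      have : (j + 1) * q = j * q + q := by ring
      omega
    have h1 : 0 < ((List.range q).map (fun x => t1 + j * q + 1 + x)).countP p :=
      List.countP_pos_iff.mpr ⟨_, hmem, by rw [hval]; exact hall (j+1)⟩
    omega

-- the per-node hit count is a lower bound for the cumulative event count
theorem pvHit_le_EL (graph : List (String × String × String)) (chars : List Char) (starts : List String)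
    (n0 : String) (hmem : n0 ∈ starts) (m : Nat) :
    (List.range m).countP (pvHit graph chars n0) ≤ (pvE graph chars starts m).length := by
  induction m with
  | zero => simp [pvE]
  | succ m ih =>
    rw [List.range_succ, List.countP_append, pvE_len_succ]
    have hc : ((if pvHit graph chars n0 m then 1 else 0) : Nat) ≤ pvCountZ (pvBuf graph chars starts (m+1)) := by
      split
      · next hh =>
        have : 0 < pvCountZ (pvBuf graph chars starts (m+1)) := by
          rw [pvBuf_eq_map_pos]
          unfold pvCountZ
          rw [← List.countP_eq_length_filter, List.countP_map]
          exact List.countP_pos_iff.mpr ⟨n0, hmem, hh⟩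
        omega
      · exact Nat.zero_le _
    have hone : (List.countP (pvHit graph chars n0) [m]) = if pvHit graph chars n0 m then 1 else 0 := by
      simp [List.countP_cons]
    omega

-- no events in [P, m) ⇒ the cumulative count is frozen
theorem pvEL_const (graph : List (String × String × String)) (chars : List Char) (starts : List String)
    (P : Nat) : ∀ m, P ≤ m →
    (∀ t, P ≤ t → t < m → pvCountZ (pvBuf graph chars starts (t+1)) = 0) →
    (pvE graph chars starts m).length = (pvE graph chars starts P).length := by
  intro m
  induction m with
  | zero => intro h _; have : P = 0 := by omega
            simp [this]
  | succ m ih =>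
    intro hPm h0
    rcases Nat.lt_or_ge P (m+1) with h | h
    · have hPm' : P ≤ m := by omega
      rw [pvE_len_succ, h0 m hPm' (Nat.lt_succ_self m),
        ih hPm' (fun t ht1 ht2 => h0 t ht1 (by omega))]
      omega
    · have : P = m + 1 := by omega
      simp [this]

-- MAIN BOUND: a terminating synchronized walk terminates within pvBound steps
theorem pvTermBound (graph : List (String × String × String)) (chars : List Char) (starts : List String)
    (hcl : pvClosed graph starts = true) (hs : starts ≠ []) (hch : chars ≠ [])
    (h : ∃ n, (pvE graph chars starts n).length = starts.length) :
    ∃ n, n ≤ pvBound graph chars starts ∧ (pvE graph chars starts n).length = starts.length := by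
  by_contra hc
  push Not at hc
  obtain ⟨k', hk⟩ : ∃ k', starts.length = k' + 1 := by
    cases starts with
    | nil => exact absurd rfl hs
    | cons x xs => exact ⟨xs.length, rfl⟩
  have hm := Nat.find_spec h
  set m := Nat.find h with hmdef
  have hmin : ∀ x, x < m → (pvE graph chars starts x).length ≠ starts.length :=
    fun x hx => Nat.find_min h hx
  set P := graph.length * chars.length with hPdef
  have hB : pvBound graph chars starts = (starts.length + 1) * P := rfl
  have hbig : (starts.length + 1) * P < m := by
    by_contra hbig
    push Not at hbig
    exact hc m (by omega) hm
  have hPle : P ≤ (starts.length + 1) * P := Nat.le_mul_of_pos_left _ (by omega)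
  have hEPlt : (pvE graph chars starts P).length < starts.length := by
    have h1 : (pvE graph chars starts P).length ≤ starts.length := by
      have := pvE_len_mono graph chars starts (show P ≤ m by omega)
      omega
    have h2 := hc P (by omega)
    omega
  -- some event happens in [P, m)
  obtain ⟨t0, ht0P, ht0m, ht0pos⟩ :
      ∃ t0, P ≤ t0 ∧ t0 < m ∧ 0 < pvCountZ (pvBuf graph chars starts (t0+1)) := by
    by_contra hno
    push Not at hno
    have hz : ∀ t, P ≤ t → t < m → pvCountZ (pvBuf graph chars starts (t+1)) = 0 := by
      intro t h1 h2; have := hno t h1 h2; omega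
    have := pvEL_const graph chars starts P m (by omega) hz
    rw [hm] at this
    omega
  -- a node responsible for it
  obtain ⟨n0, hn0mem, hn0hit⟩ : ∃ n0 ∈ starts, pvHit graph chars n0 t0 = true := by
    rw [pvBuf_eq_map_pos] at ht0pos
    unfold pvCountZ at ht0pos
    rw [← List.countP_eq_length_filter, List.countP_map] at ht0pos
    obtain ⟨n0, hmem, hp⟩ := List.countP_pos_iff.mp ht0pos
    exact ⟨n0, hmem, hp⟩
  -- its state repeats within P steps
  obtain ⟨a, b, hab, hbP, hst⟩ := pvExists_rep graph chars starts hcl n0 hn0mem hch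
  set q := b - a with hqdef
  have hq : 0 < q := by omega
  -- a hit inside the first window, recurring every q steps
  obtain ⟨t1, ht1a, ht1w, ht1hit⟩ :=
    pvHit_descend graph chars n0 hst hab t0 (by omega) hn0hit
  have hall : ∀ j, pvHit graph chars n0 (t1 + j * q) = true :=
    pvHit_forward graph chars n0 hst (Nat.le_of_lt hab) t1 ht1a ht1hit
  -- k'+1 hits within the first (k'+2)*P steps
  have hcnt := pvCount_hits (pvHit graph chars n0) t1 q hq hall k'
  have hqP : q ≤ P := by omega
  have ht1P : t1 + 1 ≤ P := by omega
  have hk'q : k' * q ≤ k' * P := Nat.mul_le_mul_left _ hqP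
  have hNle : t1 + k' * q + 1 ≤ (starts.length + 1) * P := by
    have hexp : (starts.length + 1) * P = k' * P + P + P := by rw [hk]; ring
    omega
  set A := t1 + k' * q + 1 with hAdef
  set B := (starts.length + 1) * P with hBdef
  have hsplit : B = A + (B - A) := by omega
  have hcnt2 : starts.length ≤ (List.range B).countP (pvHit graph chars n0) := by
    rw [hsplit, List.range_add, List.countP_append]
    have : k' + 1 ≤ (List.range A).countP (pvHit graph chars n0) := hcnt
    omega
  have hle := pvHit_le_EL graph chars starts n0 hn0mem B
  have hmono := pvE_len_mono graph chars starts (show B ≤ m by omega)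
  rw [hm] at hmono
  have hEB : (pvE graph chars starts B).length = starts.length := by omega
  exact hc B (by omega) hEB

-- ===== PRECONDITION & SPEC =====
-- Pre_ excludes (a) non-closed graphs — a start node or child that is not a key: A may raise
-- KeyError or stop just before touching the missing key, while B's eager full-pass walk raises —
-- and (b) inputs on which A's loop never returns at all (the cumulative Z-hit count of the
-- synchronized walk never equals len(start_nodes_list), so A diverges and returns nothing).
-- Divergence of A cannot be phrased without mentioning the walk: the termination condition is
-- stated as a plain unbounded existential over the abstract trace pvE (the specification of the
-- walk, not either port's code); it carries no fuel or size cap — decidability comes from the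
-- proved pigeonhole bound pvTermBound above.
def Pre_do_sync_traversal (instruction : String) (graph : List (String × String × String)) (start_nodes_list : List String) : Prop :=
  instruction.toList = [] ∨ start_nodes_list = [] ∨
    (pvClosed graph start_nodes_list = true ∧
     ∃ n, (pvE graph instruction.toList start_nodes_list n).length = start_nodes_list.length)

instance (instruction : String) (graph : List (String × String × String)) (start_nodes_list : List String) : Decidable (Pre_do_sync_traversal instruction graph start_nodes_list) := by
  have h : (instruction.toList = [] ∨ start_nodes_list = [] ∨
      (pvClosed graph start_nodes_list = true ∧
       ∃ n ∈ List.range (pvBound graph instruction.toList start_nodes_list + 1),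
         (pvE graph instruction.toList start_nodes_list n).length = start_nodes_list.length))
      ↔ Pre_do_sync_traversal instruction graph start_nodes_list := by
    unfold Pre_do_sync_traversal
    constructor
    · rintro (h | h | ⟨hcl, n, _, hn⟩)
      · exact Or.inl h
      · exact Or.inr (Or.inl h)
      · exact Or.inr (Or.inr ⟨hcl, n, hn⟩)
    · rintro (h | h | ⟨hcl, hex⟩)
      · exact Or.inl h
      · exact Or.inr (Or.inl h)
      · by_cases hch : instruction.toList = []
        · exact Or.inl hch
        by_cases hs : start_nodes_list = []
        · exact Or.inr (Or.inl hs)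
        obtain ⟨n, hn1, hn2⟩ := pvTermBound graph instruction.toList start_nodes_list hcl hs hch hex
        exact Or.inr (Or.inr ⟨hcl, n, List.mem_range.mpr (by omega), hn2⟩)
  exact decidable_of_iff _ h

def pvWitness_do_sync_traversal : String × (List (String × String × String)) × List String :=
  ("LR", [("AA", ("AZ", "AA")), ("AZ", ("AA", "AZ"))], ["AA"])

def Spec_do_sync_traversal (instruction : String) (graph : List (String × String × String)) (start_nodes_list : List String) (out : List Int) : Prop := out = do_sync_traversal_alt instruction graph start_nodes_list
instance (instruction : String) (graph : List (String × String × String)) (start_nodes_list : List String) (out : List Int) : Decidable (Spec_do_sync_traversal instruction graph start_nodes_list out) := by unfold Spec_do_sync_traversal; infer_instance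

-- ===== CLAIM (what is proved, stated in full; the proofs are below) =====
def Claim_equal_do_sync_traversal : Prop := ∀ (instruction : String) (graph : List (String × String × String)) (start_nodes_list : List String), Dom_do_sync_traversal instruction graph start_nodes_list → Pre_do_sync_traversal instruction graph start_nodes_list → Spec_do_sync_traversal instruction graph start_nodes_list (do_sync_traversal instruction graph start_nodes_list)

-- ===== LEMMAS AND PROOFS =====

theorem pvBuf_ok (graph : List (String × String × String)) (chars : List Char) (starts : List String)
    (hcl : pvClosed graph starts = true) (n : Nat) :
    ∀ x ∈ pvBuf graph chars starts n, pvKeyOk graph x = true := by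
  induction n with
  | zero =>
    intro x hx
    simp only [pvClosed, Bool.and_eq_true, List.all_eq_true] at hcl
    exact hcl.1 x hx
  | succ n ih =>
    intro x hx
    simp only [pvBuf, List.mem_map] at hx
    obtain ⟨y, hy, rfl⟩ := hx
    exact pvKeyOk_step graph starts hcl _ y (ih y hy)

-- A-side lemmas
theorem pvANext_eq (graph : List (String × String × String)) (c : Char) (ns : List String)
    (h : ∀ x ∈ ns, pvKeyOk graph x = true) :
    pvANext graph c ns = some (ns.map (pvStep graph c)) := by
  induction ns with
  | nil => rfl
  | cons n t ih =>
    have hn := h n (by simp)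
    rcases Option.isSome_iff_exists.mp hn with ⟨lr, hl⟩
    simp only [pvANext, hl]
    rw [ih (fun x hx => h x (by simp [hx]))]
    simp [pvStep, hl]

theorem pvAfold (nb : List String) (v : Int) (steps : List Int) :
    nb.foldl (fun acc n => if PySem.Str.endswith n "Z" then acc ++ [v] else acc) steps
      = steps ++ List.replicate (pvCountZ nb) v := by
  induction nb generalizing steps with
  | nil => simp [pvCountZ]
  | cons n t ih =>
    simp only [List.foldl_cons, pvCountZ, List.filter_cons]
    split
    · rw [ih]
      simp [pvCountZ, List.replicate_succ, List.append_assoc]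
    · rw [ih]; simp [pvCountZ]

-- A's loop runs the trace to the first exact-k step T
theorem pvALoop_run (graph : List (String × String × String)) (chars : List Char) (starts : List String) (k : Nat)
    (hcl : pvClosed graph starts = true) (T : Nat)
    (hT : (pvE graph chars starts T).length = k)
    (hmin : ∀ m, m < T → (pvE graph chars starts m).length ≠ k) :
    ∀ f i, i < T → T ≤ i + f →
      pvALoop graph chars k f i (pvBuf graph chars starts i) (pvE graph chars starts i) = pvE graph chars starts T := by
  intro f
  induction f with
  | zero => intro i h1 h2; omega
  | succ f ih =>
    intro i h1 h2
    simp only [pvALoop]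
    rw [pvANext_eq graph _ _ (pvBuf_ok graph chars starts hcl i)]
    have hb : (pvBuf graph chars starts i).map (pvStep graph (chars.getD (i % chars.length) ' '))
        = pvBuf graph chars starts (i+1) := rfl
    simp only [hb, pvAfold]
    have hE : pvE graph chars starts i ++ List.replicate (pvCountZ (pvBuf graph chars starts (i+1))) ((i : Int) + 1)
        = pvE graph chars starts (i+1) := by
      rw [pvE_succ]; rfl
    rw [hE]
    split
    · next he =>
      have : i + 1 = T := by
        rcases Nat.lt_or_ge (i+1) T with h3 | h3
        · exact absurd he (hmin (i+1) h3)
        · omega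
      rw [this]
    · next he =>
      have h3 : i + 1 < T := by
        rcases Nat.lt_or_ge (i+1) T with h3 | h3
        · exact h3
        · have : i + 1 = T := by omega
          exact absurd (this ▸ hT) he
      exact ih (i+1) h3 (by omega)

-- B-side: per-node walk abstractions
def pvW (graph : List (String × String × String)) : List Char → String → String
  | [], n => n
  | c :: cs, n => pvW graph cs (pvStep graph c n)

def pvWH (graph : List (String × String × String)) : List Char → Nat → String → List Int
  | [], _, _ => []
  | c :: cs, j, n =>
    (if PySem.Str.endswith (pvStep graph c n) "Z" then [((j : Int) + 1)] else []) ++ pvWH graph cs (j+1) (pvStep graph c n)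

theorem pvBWalk_eq (graph : List (String × String × String)) (starts : List String)
    (hcl : pvClosed graph starts = true) :
    ∀ (cs : List Char) (j : Nat) (n : String), pvKeyOk graph n = true →
      pvBWalk graph cs j n = some (pvW graph cs n, pvWH graph cs j n) := by
  intro cs
  induction cs with
  | nil => intro j n _; rfl
  | cons c cs ih =>
    intro j n hn
    rcases Option.isSome_iff_exists.mp hn with ⟨lr, hl⟩
    have hstep : (if c == 'L' then lr.1 else lr.2) = pvStep graph c n := by simp [pvStep, hl]
    simp only [pvBWalk, hl, hstep]
    rw [ih (j+1) (pvStep graph c n) (pvKeyOk_step graph starts hcl c n hn)]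
    simp [pvW, pvWH]

theorem pvBPass_eq (graph : List (String × String × String)) (starts : List String)
    (hcl : pvClosed graph starts = true) (chars : List Char) (base : Int) :
    ∀ bs : List String, (∀ x ∈ bs, pvKeyOk graph x = true) →
      pvBPass graph chars base bs
        = some (bs.map (pvW graph chars), bs.flatMap (fun n => (pvWH graph chars 0 n).map (fun h => base + h))) := by
  intro bs
  induction bs with
  | nil => intro _; rfl
  | cons n t ih =>
    intro h
    simp only [pvBPass]
    rw [pvBWalk_eq graph starts hcl chars 0 n (h n (by simp))]
    rw [ih (fun x hx => h x (by simp [hx]))]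
    simp

-- generic list shuffles used by the permutation argument
theorem pvFlatMap_append_perm {α β : Type} (l : List α) (f g : α → List β) :
    (l.flatMap (fun x => f x ++ g x)).Perm (l.flatMap f ++ l.flatMap g) := by
  induction l with
  | nil => simp
  | cons a t ih =>
    simp only [List.flatMap_cons, List.append_assoc]
    exact ((ih.append_left (g a)).append_left (f a)).trans
      ((List.perm_append_comm_assoc _ _ _).append_left _)

theorem pvFlatMap_if_replicate {α : Type} (l : List α) (p : α → Bool) (v : Int) :
    l.flatMap (fun x => if p x then [v] else []) = List.replicate (l.countP p) v := by
  induction l with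
  | nil => simp
  | cons a t ih =>
    simp only [List.flatMap_cons, List.countP_cons, ih]
    by_cases h : p a
    · simp [h, List.replicate_succ]
    · simp [h]

-- the step-major event list of one pass
def pvLockEv (graph : List (String × String × String)) : List Char → Nat → Int → List String → List Int
  | [], _, _, _ => []
  | c :: cs, j, base, bs =>
    List.replicate (pvCountZ (bs.map (pvStep graph c))) (base + ((j : Int) + 1))
      ++ pvLockEv graph cs (j+1) base (bs.map (pvStep graph c))

theorem pvLockEv_bounds (graph : List (String × String × String)) :
    ∀ (cs : List Char) (j : Nat) (base : Int) (bs : List String),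
      (pvLockEv graph cs j base bs).Pairwise (· ≤ ·) ∧
      ∀ v ∈ pvLockEv graph cs j base bs, base + ((j : Int) + 1) ≤ v := by
  intro cs
  induction cs with
  | nil => intro j base bs; simp [pvLockEv]
  | cons c cs ih =>
    intro j base bs
    obtain ⟨ihp, ihb⟩ := ih (j+1) base (bs.map (pvStep graph c))
    have hle : ∀ v ∈ pvLockEv graph cs (j+1) base (bs.map (pvStep graph c)), base + ((j : Int) + 1) ≤ v := by
      intro v hv
      have := ihb v hv
      push_cast at this ⊢
      omega
    constructor
    · simp only [pvLockEv]
      rw [List.pairwise_append]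
      refine ⟨List.pairwise_replicate.mpr (by simp), ihp, ?_⟩
      intro a ha b hb
      have ha' : a = base + ((j : Int) + 1) := List.eq_of_mem_replicate ha
      rw [ha']
      exact hle b hb
    · intro v hv
      simp only [pvLockEv, List.mem_append] at hv
      rcases hv with hv | hv
      · rw [List.eq_of_mem_replicate hv]
      · exact hle v hv

theorem pvPerm_ev (graph : List (String × String × String)) :
    ∀ (cs : List Char) (j : Nat) (base : Int) (bs : List String),
      (bs.flatMap (fun n => (pvWH graph cs j n).map (fun h => base + h))).Perm (pvLockEv graph cs j base bs) := by
  intro cs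
  induction cs with
  | nil => intro j base bs; simp [pvWH, pvLockEv]
  | cons c cs ih =>
    intro j base bs
    have h1 : (fun n => (pvWH graph (c :: cs) j n).map (fun h => base + h))
        = fun n => (if PySem.Str.endswith (pvStep graph c n) "Z" then [base + ((j : Int) + 1)] else [])
            ++ (pvWH graph cs (j+1) (pvStep graph c n)).map (fun h => base + h) := by
      funext n
      simp only [pvWH, List.map_append, apply_ite (List.map (fun h => base + h))]
      simp
    rw [h1]
    have h2 := pvFlatMap_append_perm bs
      (fun n => if PySem.Str.endswith (pvStep graph c n) "Z" then [base + ((j : Int) + 1)] else [])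
      (fun n => (pvWH graph cs (j+1) (pvStep graph c n)).map (fun h => base + h))
    have h3 : bs.flatMap (fun n => if PySem.Str.endswith (pvStep graph c n) "Z" then [base + ((j : Int) + 1)] else [])
        = List.replicate (pvCountZ (bs.map (pvStep graph c))) (base + ((j : Int) + 1)) := by
      rw [pvFlatMap_if_replicate]
      congr 1
      simp only [pvCountZ, ← List.countP_eq_length_filter, List.countP_map]
      rfl
    have h4 : bs.flatMap (fun n => (pvWH graph cs (j+1) (pvStep graph c n)).map (fun h => base + h))
        = (bs.map (pvStep graph c)).flatMap (fun n => (pvWH graph cs (j+1) n).map (fun h => base + h)) := by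
      rw [List.flatMap_map]
    rw [h3, h4] at h2
    refine h2.trans ?_
    simp only [pvLockEv]
    exact (ih (j+1) base (bs.map (pvStep graph c))).append_left _

theorem pvSorted_ev (graph : List (String × String × String)) (cs : List Char) (j : Nat) (base : Int) (bs : List String) :
    PySem.List.sorted (bs.flatMap (fun n => (pvWH graph cs j n).map (fun h => base + h))) (fun x => x) false
      = pvLockEv graph cs j base bs := by
  exact PySem.List.sorted_id_eq_of_perm_of_pairwise _ _
    (pvPerm_ev graph cs j base bs).symm (pvLockEv_bounds graph cs j base bs).1

theorem pvChar_at (chars : List Char) (p j : Nat) (hj : j < chars.length) :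
    chars.getD ((p * chars.length + j) % chars.length) ' ' = chars[j] := by
  have hm : (p * chars.length + j) % chars.length = j := by
    rw [Nat.add_comm, Nat.add_mul_mod_self_right, Nat.mod_eq_of_lt hj]
  rw [hm, List.getD_eq_getElem chars ' ' hj]

theorem pvBuf_pass_succ (graph : List (String × String × String)) (chars : List Char) (starts : List String)
    (p j : Nat) (hj : j < chars.length) :
    pvBuf graph chars starts (p * chars.length + j + 1)
      = (pvBuf graph chars starts (p * chars.length + j)).map (pvStep graph chars[j]) := by
  show (pvBuf graph chars starts (p * chars.length + j)).map
      (pvStep graph (chars.getD ((p * chars.length + j) % chars.length) ' ')) = _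
  rw [pvChar_at chars p j hj]

theorem pvW_drop (graph : List (String × String × String)) (chars : List Char) (starts : List String) (p : Nat) :
    ∀ d j, j + d = chars.length →
      (pvBuf graph chars starts (p * chars.length + j)).map (pvW graph (chars.drop j))
        = pvBuf graph chars starts (p * chars.length + chars.length) := by
  intro d
  induction d with
  | zero =>
    intro j hj
    have hjL : j = chars.length := by omega
    subst hjL
    rw [List.drop_length]
    have : ∀ bs : List String, bs.map (pvW graph []) = bs := by
      intro bs; simp [pvW]
    rw [this]
  | succ d ih =>
    intro j hj
    have hjlt : j < chars.length := by omega
    rw [List.drop_eq_getElem_cons hjlt]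
    have hmap : ∀ bs : List String, bs.map (pvW graph (chars[j] :: chars.drop (j+1)))
        = (bs.map (pvStep graph chars[j])).map (pvW graph (chars.drop (j+1))) := by
      intro bs; rw [List.map_map]; rfl
    rw [hmap, ← pvBuf_pass_succ graph chars starts p j hjlt]
    have h1 := ih (j+1) (by omega)
    rw [← Nat.add_assoc] at h1
    exact h1

-- one pass advances the trace by chars.length steps
theorem pvW_buf (graph : List (String × String × String)) (chars : List Char) (starts : List String) (p : Nat) :
    (pvBuf graph chars starts (p * chars.length)).map (pvW graph chars)
      = pvBuf graph chars starts (p * chars.length + chars.length) := by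
  have := pvW_drop graph chars starts p chars.length 0 (by omega)
  simpa using this

theorem pvLockEv_drop (graph : List (String × String × String)) (chars : List Char) (starts : List String) (p : Nat) :
    ∀ d j, j + d = chars.length →
      pvLockEv graph (chars.drop j) j ((p * chars.length : Nat) : Int)
          (pvBuf graph chars starts (p * chars.length + j))
        = (List.range d).flatMap (fun t => pvSeg graph chars starts (p * chars.length + j + t)) := by
  intro d
  induction d with
  | zero =>
    intro j hj
    have hjL : j = chars.length := by omega
    subst hjL
    rw [List.drop_length]
    simp [pvLockEv]
  | succ d ih =>
    intro j hj
    have hjlt : j < chars.length := by omega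
    rw [List.drop_eq_getElem_cons hjlt]
    simp only [pvLockEv]
    rw [← pvBuf_pass_succ graph chars starts p j hjlt]
    have hval : ((p * chars.length : Nat) : Int) + ((j : Int) + 1) = ((p * chars.length + j : Nat) : Int) + 1 := by
      push_cast; ring
    have hhead : List.replicate (pvCountZ (pvBuf graph chars starts (p * chars.length + j + 1)))
          (((p * chars.length : Nat) : Int) + ((j : Int) + 1))
        = pvSeg graph chars starts (p * chars.length + j) := by
      rw [pvSeg, hval]
    have htail := ih (j+1) (by omega)
    rw [← Nat.add_assoc] at htail
    rw [hhead, htail]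
    rw [List.range_succ_eq_map, List.flatMap_cons, List.flatMap_map]
    have harg : (List.range d).flatMap ((fun t => pvSeg graph chars starts (p * chars.length + j + 1 + t)))
        = (List.range d).flatMap ((fun t => pvSeg graph chars starts (p * chars.length + j + t)) ∘ Nat.succ) := by
      congr 1
      funext t
      simp only [Function.comp]
      congr 1
      omega
    rw [harg, Nat.add_zero]
    rfl

theorem pvLockEv_seg (graph : List (String × String × String)) (chars : List Char) (starts : List String) (p : Nat) :
    pvLockEv graph chars 0 ((p * chars.length : Nat) : Int) (pvBuf graph chars starts (p * chars.length))
      = (List.range chars.length).flatMap (fun t => pvSeg graph chars starts (p * chars.length + t)) := by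
  have := pvLockEv_drop graph chars starts p chars.length 0 (by omega)
  simpa using this

theorem pvE_block (graph : List (String × String × String)) (chars : List Char) (starts : List String) (n m : Nat) :
    pvE graph chars starts (n + m) = pvE graph chars starts n ++ (List.range m).flatMap (fun t => pvSeg graph chars starts (n + t)) := by
  induction m with
  | zero => simp
  | succ m ih =>
    have h1 : n + (m + 1) = (n + m) + 1 := by omega
    rw [h1, pvE_succ, ih, List.range_succ, List.flatMap_append, List.append_assoc]
    simp

theorem pvE_len_lt (graph : List (String × String × String)) (chars : List Char) (starts : List String)
    (k T : Nat) (hT : (pvE graph chars starts T).length = k)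
    (hmin : ∀ m, m < T → (pvE graph chars starts m).length ≠ k) :
    ∀ m, m < T → (pvE graph chars starts m).length < k := by
  intro m hm
  have h1 := pvE_len_mono graph chars starts (Nat.le_of_lt hm)
  have h2 := hmin m hm
  omega

theorem pvBLoop_done (graph : List (String × String × String)) (chars : List Char) (k : Nat)
    (f : Nat) (cur : List String) (base : Int) (out : List Int) (h : ¬ out.length < k) :
    pvBLoop graph chars k f cur base out = out.take k := by
  cases f with
  | zero => rfl
  | succ f => simp [pvBLoop, h]

-- B's loop also lands on pvE T
theorem pvBLoop_run (graph : List (String × String × String)) (chars : List Char) (starts : List String) (k : Nat)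
    (hcl : pvClosed graph starts = true) (T : Nat)
    (hT : (pvE graph chars starts T).length = k)
    (hmin : ∀ m, m < T → (pvE graph chars starts m).length ≠ k) :
    ∀ f p, (pvE graph chars starts (p * chars.length)).length < k → T ≤ (p + f) * chars.length →
      pvBLoop graph chars k f (pvBuf graph chars starts (p * chars.length)) ((p * chars.length : Nat) : Int)
          (pvE graph chars starts (p * chars.length)) = pvE graph chars starts T := by
  intro f
  induction f with
  | zero =>
    intro p hlt hTle
    exfalso
    have h1 := pvE_len_mono graph chars starts (show T ≤ p * chars.length by simpa using hTle)
    omega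
  | succ f ih =>
    intro p hlt hTle
    simp only [pvBLoop]
    rw [if_pos hlt]
    rw [pvBPass_eq graph starts hcl chars _ _ (pvBuf_ok graph chars starts hcl _)]
    simp only
    rw [pvSorted_ev, pvW_buf, pvLockEv_seg,
      ← pvE_block graph chars starts (p * chars.length) chars.length]
    have hL : p * chars.length + chars.length = (p+1) * chars.length := by ring
    have hbase : ((p * chars.length : Nat) : Int) + (chars.length : Int)
        = (((p+1) * chars.length : Nat) : Int) := by push_cast; ring
    rw [hL, hbase]
    by_cases hnext : (pvE graph chars starts ((p+1) * chars.length)).length < k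
    · refine (ih (p+1) hnext ?_)
      have he : p + 1 + f = p + (f + 1) := by omega
      rw [he]
      exact hTle
    · rw [pvBLoop_done _ _ _ _ _ _ _ hnext]
      have hTle2 : T ≤ (p+1) * chars.length := by
        by_contra hc
        push Not at hc
        exact hnext (pvE_len_lt graph chars starts k T hT hmin _ hc)
      obtain ⟨m, hm⟩ : ∃ m, (p+1) * chars.length = T + m := ⟨_, (Nat.add_sub_cancel' hTle2).symm⟩
      rw [hm, pvE_block graph chars starts T m, ← hT, List.take_left]

-- ===== VERDICT (by name: the statement is the Claim_ definition above) =====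
theorem do_sync_traversal_spec : Claim_equal_do_sync_traversal := by
  intro instruction graph starts _ hpre
  unfold Spec_do_sync_traversal
  by_cases hch : instruction.toList = []
  · simp [do_sync_traversal, do_sync_traversal_alt, hch]
  · have hL : 0 < instruction.toList.length := List.length_pos_iff.mpr hch
    have hne : ¬ instruction.toList.isEmpty = true := by simpa [List.isEmpty_iff] using hch
    by_cases hst : starts = []
    · subst hst
      have hA : do_sync_traversal instruction graph [] = [] := by
        unfold do_sync_traversal
        rw [if_neg hne]
        obtain ⟨f, hf⟩ : ∃ f, pvFuel instruction.toList graph [] = f + 1 := by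
          refine ⟨pvFuel instruction.toList graph [] - 1, ?_⟩
          unfold pvFuel
          omega
        rw [hf]
        simp [pvALoop, pvANext]
      rw [hA]
      simp [do_sync_traversal_alt]
    · rcases hpre with h | h | ⟨hcl, hex⟩
      · exact absurd h hch
      · exact absurd h hst
      have hk : 0 < starts.length := List.length_pos_iff.mpr hst
      set T := Nat.find hex with hTdef
      have hTk : (pvE graph instruction.toList starts T).length = starts.length := Nat.find_spec hex
      have hTmin : ∀ m, m < T → (pvE graph instruction.toList starts m).length ≠ starts.length :=
        fun m hm => Nat.find_min hex hm
      have hT0 : 0 < T := by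
        rcases Nat.eq_zero_or_pos T with h0 | h0
        · exfalso
          rw [h0] at hTk
          simp [pvE] at hTk
          omega
        · exact h0
      have hTf : T ≤ pvFuel instruction.toList graph starts := by
        obtain ⟨n, hn1, hn2⟩ := pvTermBound graph instruction.toList starts hcl hst hch hex
        have hTn : T ≤ n := Nat.find_min' hex hn2
        have hb : pvBound graph instruction.toList starts ≤ pvFuel instruction.toList graph starts := by
          unfold pvBound pvFuel
          have : (starts.length + 1) * (graph.length * instruction.toList.length)
              = instruction.toList.length * graph.length * (starts.length + 1) := by ring
          omega
        omega
      have hA : do_sync_traversal instruction graph starts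
          = pvE graph instruction.toList starts T := by
        unfold do_sync_traversal
        rw [if_neg hne]
        exact pvALoop_run graph instruction.toList starts starts.length hcl T hTk hTmin
          (pvFuel instruction.toList graph starts) 0 hT0 (by omega)
      have hB : do_sync_traversal_alt instruction graph starts
          = pvE graph instruction.toList starts T := by
        unfold do_sync_traversal_alt
        rw [if_neg (by simp [hne, Nat.pos_iff_ne_zero.mp hk])]
        have hrun := pvBLoop_run graph instruction.toList starts starts.length hcl T hTk hTmin
          (pvFuel instruction.toList graph starts) 0
          (by simpa [pvE] using hk)
          (by simpa using Nat.le_trans hTf (Nat.le_mul_of_pos_right _ hL))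
        simpa [pvBuf, pvE] using hrun
      rw [hA, hB]
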